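-- pv_equiv track=rewrite | github.com/diddnwjd/Algorithm | 프로그래머스/lv0/120861. 캐릭터의 좌표/캐릭터의 좌표.py | solution
-- ===== SOURCE A (Python) =====
-- def solution(keyinput, board):
--     column = board[0]
--     row = board[1]
--     answer = [0, 0]
--     for i in keyinput:
--         if i == "up" and answer[1]+1 <= (row // 2):
--             answer[1] += 1
--         if i == "down" and answer[1]-1 >= -(row // 2):
--             answer[1] -= 1
--         if i == "left" and answer[0]-1 >= -(column // 2):
--             answer[0] -= 1
--         if i == "right" and answer[0]+1 <= (column // 2):
--             answer[0] += 1
--     return answer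
-- ===== SOURCE B (Python) =====
-- def _axis(keyinput, half, pos_key, neg_key):
--     # 1-D clamped walk on one axis; h = usable half-width (never negative)
--     h = max(half, 0)
--     p = 0
--     for k in keyinput:
--         if k == pos_key:
--             p = min(p + 1, h)
--         elif k == neg_key:
--             p = max(p - 1, -h)
--     return p
--
-- def solution(keyinput, board):
--     # x and y are independent: simulate each axis in its own pass
--     return [_axis(keyinput, board[0] // 2, "right", "left"),
--             _axis(keyinput, board[1] // 2, "up", "down")]
-- ===== Notes on version B (the rewrite author's own statement) =====
-- stated objective: alternative
-- what changed: Exploits axis independence: instead of A's single pass over a 2-D state with four bound-guarded if-branches, B runs two staged passes, each a 1-D clamped walk (min/max against the non-negative half-width) over only that axis's keys.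
import Mathlib
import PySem

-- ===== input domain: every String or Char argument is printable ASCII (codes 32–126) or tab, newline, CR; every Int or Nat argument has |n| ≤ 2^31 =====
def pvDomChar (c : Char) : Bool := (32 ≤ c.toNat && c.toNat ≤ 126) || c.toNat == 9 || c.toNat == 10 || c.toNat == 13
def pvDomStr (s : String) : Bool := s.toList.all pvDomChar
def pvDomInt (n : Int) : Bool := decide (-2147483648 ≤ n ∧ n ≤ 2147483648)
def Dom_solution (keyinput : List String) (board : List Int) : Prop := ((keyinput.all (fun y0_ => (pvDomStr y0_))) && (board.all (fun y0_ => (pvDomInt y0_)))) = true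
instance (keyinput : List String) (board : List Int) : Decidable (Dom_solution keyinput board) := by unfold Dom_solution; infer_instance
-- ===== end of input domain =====

-- B exploits axis independence: two staged 1-D clamped-walk passes (one per axis) replace A's single 2-D pass with four bound-guarded branches (objective: alternative).

-- ===== PORT A =====
def aStep (column row : Int) (a : Int × Int) (i : String) : Int × Int :=
  let a := if i = "up" ∧ a.2 + 1 ≤ PySem.Int.floordiv row 2 then (a.1, a.2 + 1) else a
  let a := if i = "down" ∧ a.2 - 1 ≥ -(PySem.Int.floordiv row 2) then (a.1, a.2 - 1) else a
  let a := if i = "left" ∧ a.1 - 1 ≥ -(PySem.Int.floordiv column 2) then (a.1 - 1, a.2) else a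
  let a := if i = "right" ∧ a.1 + 1 ≤ PySem.Int.floordiv column 2 then (a.1 + 1, a.2) else a
  a

def solution (keyinput : List String) (board : List Int) : List Int :=
  match PySem.List.pyGet? board 0, PySem.List.pyGet? board 1 with
  | some column, some row =>
    let answer := keyinput.foldl (aStep column row) (0, 0)
    [answer.1, answer.2]
  | _, _ => []  -- unreachable under Pre_solution (Python raises IndexError on boards shorter than 2)

-- ===== PORT B =====
def bAxisStep (h : Int) (posKey negKey : String) (p : Int) (k : String) : Int :=
  if k = posKey then min (p + 1) h
  else if k = negKey then max (p - 1) (-h)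
  else p

def bAxis (keyinput : List String) (half : Int) (posKey negKey : String) : Int :=
  keyinput.foldl (bAxisStep (max half 0) posKey negKey) 0

def solution_alt (keyinput : List String) (board : List Int) : List Int :=
  match PySem.List.pyGet? board 0 with
  | none => []  -- unreachable under Pre_solution (Python raises IndexError on boards shorter than 2)
  | some c =>
    match PySem.List.pyGet? board 1 with
    | none => []
    | some r =>
      [bAxis keyinput (PySem.Int.floordiv c 2) "right" "left",
       bAxis keyinput (PySem.Int.floordiv r 2) "up" "down"]

-- ===== PRECONDITION & SPEC =====
-- Pre_ excludes exactly the boards with fewer than two entries, on which A raises IndexError (B raises there too).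
def Pre_solution (keyinput : List String) (board : List Int) : Prop :=
  2 ≤ board.length
instance (keyinput : List String) (board : List Int) : Decidable (Pre_solution keyinput board) := by unfold Pre_solution; infer_instance
def pvWitness_solution : List String × List Int := (["up", "left", "left"], [9, 7])

def Spec_solution (keyinput : List String) (board : List Int) (out : List Int) : Prop := out = solution_alt keyinput board
instance (keyinput : List String) (board : List Int) (out : List Int) : Decidable (Spec_solution keyinput board out) := by unfold Spec_solution; infer_instance

-- ===== CLAIM (what is proved, stated in full; the proofs are below) =====
def Claim_equal_solution : Prop := ∀ (keyinput : List String) (board : List Int), Dom_solution keyinput board → Pre_solution keyinput board → Spec_solution keyinput board (solution keyinput board)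

-- ===== LEMMAS AND PROOFS =====

-- A's step, restricted to the x axis / y axis (A's four guards touch and test one axis each).
def xStepA (c : Int) (x : Int) (i : String) : Int :=
  let x := if i = "left" ∧ x - 1 ≥ -(PySem.Int.floordiv c 2) then x - 1 else x
  if i = "right" ∧ x + 1 ≤ PySem.Int.floordiv c 2 then x + 1 else x

def yStepA (r : Int) (y : Int) (i : String) : Int :=
  let y := if i = "up" ∧ y + 1 ≤ PySem.Int.floordiv r 2 then y + 1 else y
  if i = "down" ∧ y - 1 ≥ -(PySem.Int.floordiv r 2) then y - 1 else y

theorem aStep_split (c r : Int) (p : Int × Int) (i : String) :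
    aStep c r p i = (xStepA c p.1 i, yStepA r p.2 i) := by
  simp only [aStep, xStepA, yStepA]
  split_ifs <;> simp_all

theorem foldl_aStep_split (c r : Int) :
    ∀ (ks : List String) (p : Int × Int),
      ks.foldl (aStep c r) p = (ks.foldl (xStepA c) p.1, ks.foldl (yStepA r) p.2) := by
  intro ks
  induction ks with
  | nil => intro p; rfl
  | cons k ks ih => intro p; simp only [List.foldl_cons, aStep_split, ih]

theorem xStep_eq (c : Int) (x : Int) (i : String)
    (h1 : -(max (PySem.Int.floordiv c 2) 0) ≤ x) (h2 : x ≤ max (PySem.Int.floordiv c 2) 0) :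
    xStepA c x i = bAxisStep (max (PySem.Int.floordiv c 2) 0) "right" "left" x i ∧
    -(max (PySem.Int.floordiv c 2) 0) ≤ xStepA c x i ∧ xStepA c x i ≤ max (PySem.Int.floordiv c 2) 0 := by
  simp only [xStepA, bAxisStep]
  split_ifs <;> simp_all <;> omega

theorem yStep_eq (r : Int) (y : Int) (i : String)
    (h1 : -(max (PySem.Int.floordiv r 2) 0) ≤ y) (h2 : y ≤ max (PySem.Int.floordiv r 2) 0) :
    yStepA r y i = bAxisStep (max (PySem.Int.floordiv r 2) 0) "up" "down" y i ∧
    -(max (PySem.Int.floordiv r 2) 0) ≤ yStepA r y i ∧ yStepA r y i ≤ max (PySem.Int.floordiv r 2) 0 := by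
  simp only [yStepA, bAxisStep]
  split_ifs <;> simp_all <;> omega

theorem foldl_xStep_eq (c : Int) :
    ∀ (ks : List String) (x : Int),
      -(max (PySem.Int.floordiv c 2) 0) ≤ x → x ≤ max (PySem.Int.floordiv c 2) 0 →
      ks.foldl (xStepA c) x = ks.foldl (bAxisStep (max (PySem.Int.floordiv c 2) 0) "right" "left") x := by
  intro ks
  induction ks with
  | nil => intro x _ _; rfl
  | cons k ks ih =>
    intro x h1 h2
    obtain ⟨heq, b1, b2⟩ := xStep_eq c x k h1 h2
    simp only [List.foldl_cons]
    rw [← heq]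
    exact ih _ b1 b2

theorem foldl_yStep_eq (r : Int) :
    ∀ (ks : List String) (y : Int),
      -(max (PySem.Int.floordiv r 2) 0) ≤ y → y ≤ max (PySem.Int.floordiv r 2) 0 →
      ks.foldl (yStepA r) y = ks.foldl (bAxisStep (max (PySem.Int.floordiv r 2) 0) "up" "down") y := by
  intro ks
  induction ks with
  | nil => intro y _ _; rfl
  | cons k ks ih =>
    intro y h1 h2
    obtain ⟨heq, b1, b2⟩ := yStep_eq r y k h1 h2
    simp only [List.foldl_cons]
    rw [← heq]
    exact ih _ b1 b2

-- ===== VERDICT (by name: the statement is the Claim_ definition above) =====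
theorem solution_spec : Claim_equal_solution := by
  intro keyinput board _ hpre
  unfold Spec_solution
  match board, hpre with
  | c :: r :: rest, _ =>
    have g0 : PySem.List.pyGet? (c :: r :: rest) 0 = some c := PySem.List.pyGet?_zero_cons c (r :: rest)
    have g1 : PySem.List.pyGet? (c :: r :: rest) 1 = some r := by
      simp [PySem.List.pyGet?, PySem.List.pyIdx?]
    simp only [solution, solution_alt, g0, g1, bAxis, foldl_aStep_split]
    rw [foldl_xStep_eq c keyinput 0 (by omega) (by omega),
        foldl_yStep_eq r keyinput 0 (by omega) (by omega)]
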